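-- pv_equiv track=rewrite | github.com/eigenric/turingfy | turingfy/playlist_translator.py | playlist_to_post_program
-- ===== SOURCE A (Python) =====
-- def playlist_to_post_program(exec_tracks, playlist_token_map):
--     """
--     Dada una lista de tracks (playlist ejecutable) y un diccionario (track_id,track_name)->instruccion,
--     devuelve el programa Post Turing fusionando IF/GOTO y la lista de track_ids.
--     """
--     instructions = [
--         {"uri": track["uri"], "name": track["name"]} for track in exec_tracks
--     ]
--     post_program = []
--     program_track_ids = []
--     idx = 0
--     while idx < len(instructions):
--         track = instructions[idx]
--         track_id = track["uri"].split(":")[-1]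
--         track_name = track["name"]
--         instr = playlist_token_map.get((track_id, track_name))
--         if instr is None:
--             idx += 1
--             continue
--         instr = instr.upper()
--         # Fusionar IF y GOTO
--         if instr == "IF" and idx + 1 < len(instructions):
--             next_track = instructions[idx + 1]
--             next_id = next_track["uri"].split(":")[-1]
--             next_name = next_track["name"]
--             next_instr = playlist_token_map.get((next_id, next_name))
--             if next_instr:
--                 post_program.append(f"IF {next_instr}")
--                 program_track_ids.append(track_id)
--                 idx += 2
--                 continue
--         if instr == "GOTO" and idx + 1 < len(instructions):
--             next_track = instructions[idx + 1]
--             next_id = next_track["uri"].split(":")[-1]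
--             next_name = next_track["name"]
--             next_instr = playlist_token_map.get((next_id, next_name))
--             if next_instr:
--                 post_program.append(f"GOTO {next_instr}")
--                 program_track_ids.append(track_id)
--                 idx += 2
--                 continue
--         post_program.append(instr)
--         program_track_ids.append(track_id)
--         idx += 1
--     return post_program, program_track_ids
-- ===== SOURCE B (Python) =====
-- def playlist_to_post_program(exec_tracks, playlist_token_map):
--     # Pass 1: resolve every track to (track_id, raw token) once.
--     table = [
--         (track["uri"].split(":")[-1],
--          playlist_token_map.get((track["uri"].split(":")[-1], track["name"])))
--         for track in exec_tracks
--     ]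
--     # Pass 2: consume the table as a stack, one unified IF/GOTO fuse branch.
--     stack = table[::-1]
--     post_program, program_track_ids = [], []
--     while stack:
--         track_id, raw = stack.pop()
--         if raw is None:
--             continue
--         instr = raw.upper()
--         if instr in ("IF", "GOTO") and stack and stack[-1][1]:
--             post_program.append(f"{instr} {stack.pop()[1]}")
--         else:
--             post_program.append(instr)
--         program_track_ids.append(track_id)
--     return post_program, program_track_ids
-- ===== Notes on version B (the rewrite author's own statement) =====
-- stated objective: simpler
-- what changed: B first resolves every track to a (track_id, token) table in one comprehension, then runs a single stack-consuming merge pass with one unified IF/GOTO fuse branch and one shared id-append, instead of A's index-driven loop that re-derives ids and tokens at each position and duplicates the whole IF and GOTO blocks.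
import Mathlib
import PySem

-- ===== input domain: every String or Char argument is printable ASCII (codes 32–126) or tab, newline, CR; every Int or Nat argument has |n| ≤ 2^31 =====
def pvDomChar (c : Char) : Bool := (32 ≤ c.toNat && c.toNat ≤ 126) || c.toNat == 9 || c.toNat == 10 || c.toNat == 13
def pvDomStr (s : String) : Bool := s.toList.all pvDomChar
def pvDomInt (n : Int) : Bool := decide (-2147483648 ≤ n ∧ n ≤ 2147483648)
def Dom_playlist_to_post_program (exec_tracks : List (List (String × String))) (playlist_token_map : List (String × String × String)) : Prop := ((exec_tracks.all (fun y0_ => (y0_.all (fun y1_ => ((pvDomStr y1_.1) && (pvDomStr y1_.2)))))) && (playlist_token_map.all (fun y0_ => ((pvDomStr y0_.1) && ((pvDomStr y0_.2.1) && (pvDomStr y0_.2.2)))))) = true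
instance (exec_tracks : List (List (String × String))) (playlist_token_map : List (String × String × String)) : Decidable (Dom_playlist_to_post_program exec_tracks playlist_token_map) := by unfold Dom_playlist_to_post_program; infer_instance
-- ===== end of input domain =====

-- B resolves each track to a (track_id, token) table in one pass, then one stack-consuming
-- merge pass with a single unified IF/GOTO fuse branch — simpler than A's index loop with
-- duplicated IF and GOTO blocks; equal output proved on Pre_ (tracks carrying "uri"/"name").


-- shared helpers (both Pythons compute these identical subexpressions)
-- track["uri"].split(":")[-1]; ":" ≠ "" and split(":") is never empty, so neither .getD fires
def pvLastTok (s : String) : String := (PySem.List.pyGet? ((PySem.Str.split? s ":").getD []) (-1)).getD ""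

-- playlist_token_map.get((id, name)): first match under the association-list convention
def pvMapGet (pm : List (String × String × String)) (id name : String) : Option String :=
  (pm.find? (fun p => p.1 == id && p.2.1 == name)).map (·.2.2)

-- ===== PORT A =====
-- A's while loop, step for step (the duplicated IF and GOTO blocks and the dead fall-through
-- are kept); Python's growing lists become cons-accumulators reversed on exit
def pvLoopA (insns : List (String × String)) (pm : List (String × String × String))
    (idx : Nat) (post ids : List String) : List String × List String :=
  if h : idx < insns.length then
    match pvMapGet pm (pvLastTok (insns[idx]'h).1) (insns[idx]'h).2 with
    | none => pvLoopA insns pm (idx + 1) post ids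
    | some i0 =>
      if h2 : PySem.Str.upper i0 = "IF" ∧ idx + 1 < insns.length then
        match pvMapGet pm (pvLastTok (insns[idx + 1]'h2.2).1) (insns[idx + 1]'h2.2).2 with
        | some ni =>
          if ni ≠ "" then
            pvLoopA insns pm (idx + 2) ((PySem.Str.upper i0 ++ " " ++ ni) :: post) (pvLastTok (insns[idx]'h).1 :: ids)
          else -- fall through to the GOTO check (dead here, as in Python)
            if h3 : PySem.Str.upper i0 = "GOTO" ∧ idx + 1 < insns.length then
              match pvMapGet pm (pvLastTok (insns[idx + 1]'h3.2).1) (insns[idx + 1]'h3.2).2 with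
              | some ni' =>
                if ni' ≠ "" then
                  pvLoopA insns pm (idx + 2) ((PySem.Str.upper i0 ++ " " ++ ni') :: post) (pvLastTok (insns[idx]'h).1 :: ids)
                else pvLoopA insns pm (idx + 1) (PySem.Str.upper i0 :: post) (pvLastTok (insns[idx]'h).1 :: ids)
              | none => pvLoopA insns pm (idx + 1) (PySem.Str.upper i0 :: post) (pvLastTok (insns[idx]'h).1 :: ids)
            else pvLoopA insns pm (idx + 1) (PySem.Str.upper i0 :: post) (pvLastTok (insns[idx]'h).1 :: ids)
        | none =>
          if h3 : PySem.Str.upper i0 = "GOTO" ∧ idx + 1 < insns.length then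
            match pvMapGet pm (pvLastTok (insns[idx + 1]'h3.2).1) (insns[idx + 1]'h3.2).2 with
            | some ni' =>
              if ni' ≠ "" then
                pvLoopA insns pm (idx + 2) ((PySem.Str.upper i0 ++ " " ++ ni') :: post) (pvLastTok (insns[idx]'h).1 :: ids)
              else pvLoopA insns pm (idx + 1) (PySem.Str.upper i0 :: post) (pvLastTok (insns[idx]'h).1 :: ids)
            | none => pvLoopA insns pm (idx + 1) (PySem.Str.upper i0 :: post) (pvLastTok (insns[idx]'h).1 :: ids)
          else pvLoopA insns pm (idx + 1) (PySem.Str.upper i0 :: post) (pvLastTok (insns[idx]'h).1 :: ids)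
      else
        if h3 : PySem.Str.upper i0 = "GOTO" ∧ idx + 1 < insns.length then
          match pvMapGet pm (pvLastTok (insns[idx + 1]'h3.2).1) (insns[idx + 1]'h3.2).2 with
          | some ni' =>
            if ni' ≠ "" then
              pvLoopA insns pm (idx + 2) ((PySem.Str.upper i0 ++ " " ++ ni') :: post) (pvLastTok (insns[idx]'h).1 :: ids)
            else pvLoopA insns pm (idx + 1) (PySem.Str.upper i0 :: post) (pvLastTok (insns[idx]'h).1 :: ids)
          | none => pvLoopA insns pm (idx + 1) (PySem.Str.upper i0 :: post) (pvLastTok (insns[idx]'h).1 :: ids)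
        else pvLoopA insns pm (idx + 1) (PySem.Str.upper i0 :: post) (pvLastTok (insns[idx]'h).1 :: ids)
  else (post.reverse, ids.reverse)
termination_by insns.length - idx
decreasing_by all_goals omega

-- track["uri"] / track["name"]: Pre_ excludes tracks missing either key (Python KeyError)
def playlist_to_post_program (exec_tracks : List (List (String × String))) (playlist_token_map : List (String × String × String)) : List String × List String :=
  let instructions := exec_tracks.map (fun t =>
    (((PySem.Dict.mk t).get? "uri").getD "", ((PySem.Dict.mk t).get? "name").getD ""))
  pvLoopA instructions playlist_token_map 0 [] []

-- ===== PORT B =====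
-- B's while over the stack (top of the Python stack = head of this list)
def pvFuseB (stack : List (String × Option String)) (post ids : List String) : List String × List String :=
  match stack with
  | [] => (post.reverse, ids.reverse)
  | (track_id, raw) :: rest =>
    match raw with
    | none => pvFuseB rest post ids
    | some r =>
      if PySem.Str.upper r = "IF" ∨ PySem.Str.upper r = "GOTO" then
        match _h2 : rest with
        | (_, some s) :: rest2 =>
          if s ≠ "" then pvFuseB rest2 ((PySem.Str.upper r ++ " " ++ s) :: post) (track_id :: ids)
          else pvFuseB rest (PySem.Str.upper r :: post) (track_id :: ids)
        | _ => pvFuseB rest (PySem.Str.upper r :: post) (track_id :: ids)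
      else pvFuseB rest (PySem.Str.upper r :: post) (track_id :: ids)
termination_by stack.length
decreasing_by all_goals (simp_all; try omega)

def playlist_to_post_program_alt (exec_tracks : List (List (String × String))) (playlist_token_map : List (String × String × String)) : List String × List String :=
  let table := exec_tracks.map (fun t =>
    let tid := pvLastTok (((PySem.Dict.mk t).get? "uri").getD "")
    (tid, pvMapGet playlist_token_map tid (((PySem.Dict.mk t).get? "name").getD "")))
  pvFuseB table [] []

-- ===== PRECONDITION & SPEC =====
-- Pre_ excludes exactly the inputs where A raises KeyError: a track without a "uri" or "name" key
def Pre_playlist_to_post_program (exec_tracks : List (List (String × String))) (playlist_token_map : List (String × String × String)) : Prop :=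
  ∀ t ∈ exec_tracks, ((PySem.Dict.mk t).get? "uri").isSome = true ∧ ((PySem.Dict.mk t).get? "name").isSome = true
instance (exec_tracks : List (List (String × String))) (playlist_token_map : List (String × String × String)) : Decidable (Pre_playlist_to_post_program exec_tracks playlist_token_map) := by unfold Pre_playlist_to_post_program; infer_instance

def pvWitness_playlist_to_post_program : (List (List (String × String))) × (List (String × String × String)) :=
  ([[("uri", "spotify:track:a1"), ("name", "x")], [("uri", "spotify:track:b2"), ("name", "y")]],
   [("a1", "x", "if"), ("b2", "y", "7")])

def Spec_playlist_to_post_program (exec_tracks : List (List (String × String))) (playlist_token_map : List (String × String × String)) (out : List String × List String) : Prop := out = playlist_to_post_program_alt exec_tracks playlist_token_map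
instance (exec_tracks : List (List (String × String))) (playlist_token_map : List (String × String × String)) (out : List String × List String) : Decidable (Spec_playlist_to_post_program exec_tracks playlist_token_map out) := by unfold Spec_playlist_to_post_program; infer_instance

-- ===== CLAIM (what is proved, stated in full; the proofs are below) =====
def Claim_equal_playlist_to_post_program : Prop := ∀ (exec_tracks : List (List (String × String))) (playlist_token_map : List (String × String × String)), Dom_playlist_to_post_program exec_tracks playlist_token_map → Pre_playlist_to_post_program exec_tracks playlist_token_map → Spec_playlist_to_post_program exec_tracks playlist_token_map (playlist_to_post_program exec_tracks playlist_token_map)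

-- ===== LEMMAS AND PROOFS =====

-- the table B builds, abstracted over the already-projected (uri, name) pairs
def pvTableOf (insns : List (String × String)) (pm : List (String × String × String)) : List (String × Option String) :=
  insns.map (fun tr => (pvLastTok tr.1, pvMapGet pm (pvLastTok tr.1) tr.2))

-- loop invariant: A's while loop from position idx equals B's merge pass on the rest of the table
lemma pv_loop_eq (insns : List (String × String)) (pm : List (String × String × String)) :
    ∀ fuel idx post ids, insns.length - idx ≤ fuel →
      pvLoopA insns pm idx post ids = pvFuseB ((pvTableOf insns pm).drop idx) post ids := by
  intro fuel
  induction fuel with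
  | zero =>
    intro idx post ids h
    have hge : insns.length ≤ idx := by omega
    rw [pvLoopA, dif_neg (by omega)]
    rw [List.drop_eq_nil_of_le (by simp only [pvTableOf, List.length_map]; omega), pvFuseB]
  | succ n ih =>
    intro idx post ids h
    by_cases hlt : idx < insns.length
    · have hlt' : idx < (pvTableOf insns pm).length := by simpa [pvTableOf] using hlt
      have hdrop : (pvTableOf insns pm).drop idx
          = (pvLastTok (insns[idx]'hlt).1, pvMapGet pm (pvLastTok (insns[idx]'hlt).1) (insns[idx]'hlt).2)
            :: (pvTableOf insns pm).drop (idx+1) := by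
        rw [List.drop_eq_getElem_cons hlt']
        simp [pvTableOf]
      rw [pvLoopA, dif_pos hlt, hdrop, pvFuseB.eq_def]
      cases ho : pvMapGet pm (pvLastTok (insns[idx]'hlt).1) (insns[idx]'hlt).2 with
      | none => simpa using ih (idx+1) post ids (by omega)
      | some i0 =>
        simp only
        by_cases hn : idx + 1 < insns.length
        · have hlt2 : idx + 1 < (pvTableOf insns pm).length := by
            simp only [pvTableOf, List.length_map]; omega
          have hdrop2 : (pvTableOf insns pm).drop (idx+1)
              = (pvLastTok (insns[idx+1]'hn).1, pvMapGet pm (pvLastTok (insns[idx+1]'hn).1) (insns[idx+1]'hn).2)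
                :: (pvTableOf insns pm).drop (idx+2) := by
            rw [List.drop_eq_getElem_cons hlt2]
            simp [pvTableOf]
          rw [hdrop2]
          by_cases hIF : PySem.Str.upper i0 = "IF"
          · rw [dif_pos ⟨hIF, hn⟩]
            cases ho2 : pvMapGet pm (pvLastTok (insns[idx+1]'hn).1) (insns[idx+1]'hn).2 with
            | none =>
              simp [hIF]
              rw [← ho2, ← hdrop2]
              exact ih (idx+1) _ _ (by omega)
            | some s =>
              by_cases hs : s = ""
              · subst hs
                simp [hIF]
                rw [← ho2, ← hdrop2]
                exact ih (idx+1) _ _ (by omega)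
              · simp [hIF, hs]
                exact ih (idx+2) _ _ (by omega)
          · by_cases hG : PySem.Str.upper i0 = "GOTO"
            · rw [dif_neg (fun hc => hIF hc.1), dif_pos ⟨hG, hn⟩]
              cases ho2 : pvMapGet pm (pvLastTok (insns[idx+1]'hn).1) (insns[idx+1]'hn).2 with
              | none =>
                simp [hG]
                rw [← ho2, ← hdrop2]
                exact ih (idx+1) _ _ (by omega)
              | some s =>
                by_cases hs : s = ""
                · subst hs
                  simp [hG]
                  rw [← ho2, ← hdrop2]
                  exact ih (idx+1) _ _ (by omega)
                · simp [hG, hs]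
                  exact ih (idx+2) _ _ (by omega)
            · rw [dif_neg (fun hc => hIF hc.1), dif_neg (fun hc => hG hc.1),
                  if_neg (by rintro (h | h) <;> [exact hIF h; exact hG h])]
              rw [← hdrop2]
              exact ih (idx+1) _ _ (by omega)
        · have hdrop2 : (pvTableOf insns pm).drop (idx+1) = [] :=
            List.drop_eq_nil_of_le (by simp only [pvTableOf, List.length_map]; omega)
          rw [hdrop2, dif_neg (fun hc => hn hc.2), dif_neg (fun hc => hn hc.2)]
          by_cases hOr : PySem.Str.upper i0 = "IF" ∨ PySem.Str.upper i0 = "GOTO"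
          · rw [if_pos hOr]
            simp
            rw [← hdrop2]
            exact ih (idx+1) _ _ (by omega)
          · rw [if_neg hOr, ← hdrop2]
            exact ih (idx+1) _ _ (by omega)
    · rw [pvLoopA, dif_neg hlt]
      rw [List.drop_eq_nil_of_le (by simp only [pvTableOf, List.length_map]; omega), pvFuseB]

-- ===== VERDICT (by name: the statement is the Claim_ definition above) =====
theorem playlist_to_post_program_spec : Claim_equal_playlist_to_post_program := by
  intro et pm _ _
  unfold Spec_playlist_to_post_program
  unfold playlist_to_post_program playlist_to_post_program_alt
  rw [pv_loop_eq _ pm (et.map (fun t =>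
    (((PySem.Dict.mk t).get? "uri").getD "", ((PySem.Dict.mk t).get? "name").getD ""))).length 0 [] [] (by omega)]
  simp [pvTableOf, List.map_map]
  rfl
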